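-- pv_equiv track=rewrite | github.com/minus9d/programming_contest_archive | event/keyence2019/c/c.py | solve
-- ===== SOURCE A (Python) =====
-- def solve(N, As, Bs):
--     A_sum = sum(As)
--     B_sum = sum(Bs)
--     if A_sum < B_sum:
--         return -1
--     margin = A_sum - B_sum
--
--     ans = 0
--     need = 0
--     extra = []
--     for a, b in zip(As, Bs):
--         if b > a:
--             need += b - a
--             ans += 1
--         elif a > b:
--             extra.append(a - b)
--     extra.sort()
--     extra.reverse()
--     i = 0
--     while need > 0:
--         need -= extra[i]
--         i += 1
--         ans += 1
--     return ans
-- ===== SOURCE B (Python) =====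
-- def solve(N, As, Bs):
--     A_sum = sum(As)
--     B_sum = sum(Bs)
--     if A_sum < B_sum:
--         return -1
--     boxes = sum(1 for a, b in zip(As, Bs) if b > a)
--     need = sum(b - a for a, b in zip(As, Bs) if b > a)
--     extras = sorted((a - b for a, b in zip(As, Bs) if a > b), reverse=True)
--     # prefix[j] = sum of the j largest surpluses
--     prefix = [0]
--     t = 0
--     for e in extras:
--         t += e
--         prefix.append(t)
--     # binary search: smallest index lo with prefix[lo] >= need
--     lo, hi = 0, len(prefix) - 1
--     while lo < hi:
--         mid = (lo + hi) // 2
--         if prefix[mid] >= need: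
--             hi = mid
--         else:
--             lo = mid + 1
--     return boxes + lo
-- ===== Notes on version B (the rewrite author's own statement) =====
-- stated objective: alternative
-- what changed: A's subtract-until-covered loop over the descending surpluses is replaced by a cumulative prefix-sum list and a binary search for the least prefix covering the deficit (and the per-position pass is split into comprehensions).
import Mathlib
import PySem

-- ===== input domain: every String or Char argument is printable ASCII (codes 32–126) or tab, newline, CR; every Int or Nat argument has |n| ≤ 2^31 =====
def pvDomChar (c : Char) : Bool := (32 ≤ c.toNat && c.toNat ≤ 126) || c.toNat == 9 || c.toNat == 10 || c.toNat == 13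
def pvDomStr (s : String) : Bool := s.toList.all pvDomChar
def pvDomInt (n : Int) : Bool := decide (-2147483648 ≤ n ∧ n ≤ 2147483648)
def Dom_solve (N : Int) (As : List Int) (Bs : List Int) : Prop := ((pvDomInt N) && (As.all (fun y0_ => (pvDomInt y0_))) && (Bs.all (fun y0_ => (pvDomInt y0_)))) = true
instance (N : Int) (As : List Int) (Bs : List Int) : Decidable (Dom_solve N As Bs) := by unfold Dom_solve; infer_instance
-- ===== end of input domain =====

-- B replaces A's subtract-until-covered loop over the sorted surpluses by a prefix-sum
-- list plus a hand-written binary search for the least covering prefix (objective: alternative).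

-- ===== PORT A =====
-- body of A's for-loop over zip(As, Bs), state (ans, need, extra)
def stepA (st : Int × Int × List Int) (ab : Int × Int) : Int × Int × List Int :=
  if ab.2 > ab.1 then (st.1 + 1, st.2.1 + (ab.2 - ab.1), st.2.2)
  else if ab.1 > ab.2 then (st.1, st.2.1, st.2.2 ++ [ab.1 - ab.2])
  else st

-- A's `while need > 0` loop, walking the (sorted, reversed) extra list by index
def solveLoopA (need ans : Int) (extra : List Int) : Int :=
  if 0 < need then
    match extra with
    | [] => ans  -- Python raises IndexError (extra[i]) here; unreachable under Pre_solve
    | e :: rest => solveLoopA (need - e) (ans + 1) rest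
  else ans

def solve (N : Int) (As : List Int) (Bs : List Int) : Int :=
  let A_sum := As.sum
  let B_sum := Bs.sum
  if A_sum < B_sum then -1
  else
    let _margin := A_sum - B_sum
    let st := (As.zip Bs).foldl stepA (0, 0, [])
    let extra := (PySem.List.sorted st.2.2 (fun x => x) false).reverse
    solveLoopA st.2.1 st.1 extra

-- ===== PORT B =====
-- prefix = [0]; t = 0; for e in extras: t += e; prefix.append(t)
def prefixSumsB (extras : List Int) : List Int :=
  (extras.foldl (fun (pt : List Int × Int) e => (pt.1 ++ [pt.2 + e], pt.2 + e)) ([0], 0)).1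

-- while lo < hi: mid = (lo+hi)//2; …   (prefix[mid] is always in range, so getD is exact)
def bsearchB (p : List Int) (need : Int) (lo hi : Nat) : Nat :=
  if lo < hi then
    let mid := (lo + hi) / 2
    if need ≤ p.getD mid 0 then bsearchB p need lo mid
    else bsearchB p need (mid + 1) hi
  else lo
termination_by hi - lo
decreasing_by all_goals omega

def solve_alt (N : Int) (As : List Int) (Bs : List Int) : Int :=
  let A_sum := As.sum
  let B_sum := Bs.sum
  if A_sum < B_sum then -1
  else
    let pairs := As.zip Bs
    let boxes : Int := ((pairs.filter (fun ab => ab.2 > ab.1)).length : Int)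
    let need : Int := (pairs.filter (fun ab => ab.2 > ab.1)).foldl (fun s ab => s + (ab.2 - ab.1)) 0
    let extras := PySem.List.sorted ((pairs.filter (fun ab => ab.1 > ab.2)).map (fun ab => ab.1 - ab.2)) (fun x => x) true
    let pfx := prefixSumsB extras
    boxes + (bsearchB pfx need 0 (pfx.length - 1) : Int)

-- ===== PRECONDITION & SPEC =====
-- Pre_ excludes exactly the inputs on which A raises IndexError: sum(As) >= sum(Bs) but the
-- paired surpluses do not cover the paired deficit, so A's while loop runs off the end of
-- extra (possible only when the lists have unequal lengths, since zip truncates while the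
-- sums use the full lists).
def Pre_solve (N : Int) (As : List Int) (Bs : List Int) : Prop :=
  As.sum < Bs.sum ∨
    (((As.zip Bs).filter (fun ab => ab.2 > ab.1)).map (fun ab => ab.2 - ab.1)).sum ≤
      (((As.zip Bs).filter (fun ab => ab.1 > ab.2)).map (fun ab => ab.1 - ab.2)).sum
instance (N : Int) (As : List Int) (Bs : List Int) : Decidable (Pre_solve N As Bs) := by unfold Pre_solve; infer_instance

def pvWitness_solve : Int × List Int × List Int := (3, [3, 1, 2], [2, 2, 2])

def Spec_solve (N : Int) (As : List Int) (Bs : List Int) (out : Int) : Prop := out = solve_alt N As Bs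
instance (N : Int) (As : List Int) (Bs : List Int) (out : Int) : Decidable (Spec_solve N As Bs out) := by unfold Spec_solve; infer_instance

-- ===== CLAIM (what is proved, stated in full; the proofs are below) =====
def Claim_equal_solve : Prop := ∀ (N : Int) (As : List Int) (Bs : List Int), Dom_solve N As Bs → Pre_solve N As Bs → Spec_solve N As Bs (solve N As Bs)

-- ===== LEMMAS AND PROOFS =====

-- A's fold in closed form
theorem foldA_eq (l : List (Int × Int)) (ans need : Int) (extra : List Int) :
    l.foldl stepA (ans, need, extra) =
      (ans + ((l.filter (fun ab => ab.2 > ab.1)).length : Int),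
       need + ((l.filter (fun ab => ab.2 > ab.1)).map (fun ab => ab.2 - ab.1)).sum,
       extra ++ (l.filter (fun ab => ab.1 > ab.2)).map (fun ab => ab.1 - ab.2)) := by
  induction l generalizing ans need extra with
  | nil => simp
  | cons a tl ih =>
    simp only [List.foldl_cons, stepA]
    by_cases h1 : a.1 < a.2
    · rw [if_pos h1, ih]
      simp [h1, not_lt.mpr h1.le, Prod.ext_iff]
      constructor
      · ring
      · ring
    · by_cases h2 : a.2 < a.1
      · rw [if_neg h1, if_pos h2, ih]
        simp [h1, h2]
      · rw [if_neg h1, if_neg h2, ih]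
        simp [h1, h2]

-- B's need-fold is a sum
theorem foldl_add_sub (l : List (Int × Int)) (s : Int) :
    l.foldl (fun s ab => s + (ab.2 - ab.1)) s = s + (l.map (fun ab => ab.2 - ab.1)).sum := by
  induction l generalizing s with
  | nil => simp
  | cons a tl ih => simp [ih, add_assoc]

-- reverse of the ascending sort = the descending sort (ints, identity key)
theorem rev_sorted_eq (e : List Int) :
    (PySem.List.sorted e (fun x => x) false).reverse = PySem.List.sorted e (fun x => x) true := by
  apply PySem.List.eq_of_perm_of_pairwise_le_of_injective (fun x : Int => -x) (fun a b h => by simpa using h)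
  · exact ((PySem.List.sorted e (fun x => x) false).reverse_perm.trans
      (PySem.List.sorted_perm e (fun x => x) false)).trans
      (PySem.List.sorted_perm e (fun x => x) true).symm
  · rw [List.pairwise_reverse]
    have := PySem.List.sorted_pairwise e (fun x => x)
    exact this.imp (by intro a b h; omega)
  · have := PySem.List.sorted_pairwise_rev e (fun x => x)
    exact this.imp (by intro a b h; omega)

theorem prefixAux (e : List Int) (acc : List Int) (t : Int) :
    (e.foldl (fun (pt : List Int × Int) x => (pt.1 ++ [pt.2 + x], pt.2 + x)) (acc, t)).1
      = acc ++ (List.range e.length).map (fun j => t + (e.take (j + 1)).sum) := by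
  induction e generalizing acc t with
  | nil => simp
  | cons a tl ih =>
    simp only [List.foldl_cons]
    rw [ih, List.length_cons, List.range_succ_eq_map]
    simp [List.map_map, Function.comp, List.take_succ_cons, add_assoc]

-- prefixSumsB in closed form
theorem prefixSumsB_eq (e : List Int) :
    prefixSumsB e = (List.range (e.length + 1)).map (fun j => (e.take j).sum) := by
  rw [prefixSumsB, prefixAux, List.range_succ_eq_map]
  simp [List.map_map, Function.comp]

theorem length_prefixSumsB (e : List Int) : (prefixSumsB e).length = e.length + 1 := by
  simp [prefixSumsB_eq]

theorem prefixSumsB_getD (e : List Int) (j : Nat) (hj : j ≤ e.length) :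
    (prefixSumsB e).getD j 0 = (e.take j).sum := by
  rw [prefixSumsB_eq]
  rw [List.getD_eq_getElem?_getD, List.getElem?_map, List.getElem?_range (by omega)]
  simp

-- A's while-loop returns ans + (least k whose k-prefix of extras covers need)
theorem loopA_spec (e : List Int) (need ans : Int) (h : need ≤ e.sum) :
    ∃ k : Nat, k ≤ e.length ∧ solveLoopA need ans e = ans + (k : Int) ∧
      need ≤ (e.take k).sum ∧ ∀ j < k, ¬ need ≤ (e.take j).sum := by
  induction e generalizing need ans with
  | nil =>
    refine ⟨0, by simp, ?_, by simpa using h, by omega⟩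
    rw [solveLoopA]
    simp at h
    rw [if_neg (by omega)]
    simp
  | cons a tl ih =>
    by_cases hp : 0 < need
    · have h' : need - a ≤ tl.sum := by simp at h; omega
      obtain ⟨k, hk, hval, hcov, hleast⟩ := ih (need - a) (ans + 1) h'
      refine ⟨k + 1, by simp; omega, ?_, ?_, ?_⟩
      · rw [solveLoopA, if_pos hp]
        rw [hval]; push_cast; ring
      · simp only [List.take_succ_cons, List.sum_cons]; omega
      · intro j hj
        cases j with
        | zero => simp; omega
        | succ j' =>
          have := hleast j' (by omega)
          simp only [List.take_succ_cons, List.sum_cons] at this ⊢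
          omega
    · refine ⟨0, by simp, ?_, by simp; omega, by omega⟩
      rw [solveLoopA]; simp [hp]

-- binary-search correctness (plain induction on a bound of hi - lo)
theorem bsearch_spec (p : List Int) (need : Int)
    (hmono : ∀ i j : Nat, i ≤ j → j < p.length → p.getD i 0 ≤ p.getD j 0) :
    ∀ d lo hi : Nat, hi - lo ≤ d → lo ≤ hi → hi < p.length →
    need ≤ p.getD hi 0 → (∀ j < lo, ¬ need ≤ p.getD j 0) →
    bsearchB p need lo hi ≤ hi ∧ need ≤ p.getD (bsearchB p need lo hi) 0 ∧
      ∀ j < bsearchB p need lo hi, ¬ need ≤ p.getD j 0 := by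
  intro d
  induction d with
  | zero =>
    intro lo hi hd hlh hhp hsat hbel
    have heq : lo = hi := by omega
    subst heq
    rw [bsearchB, if_neg (lt_irrefl lo)]
    exact ⟨le_refl _, hsat, hbel⟩
  | succ d ih =>
    intro lo hi hd hlh hhp hsat hbel
    rw [bsearchB]
    by_cases hlt : lo < hi
    · simp only [hlt, if_true]
      by_cases hc : need ≤ p.getD ((lo + hi) / 2) 0
      · simp only [hc, if_true]
        have := ih lo ((lo + hi) / 2) (by omega) (by omega) (by omega) hc hbel
        exact ⟨by omega, this.2⟩
      · simp only [hc, if_false]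
        have hbel' : ∀ j < (lo + hi) / 2 + 1, ¬ need ≤ p.getD j 0 := by
          intro j hj
          by_cases hjl : j < lo
          · exact hbel j hjl
          · intro habs
            exact hc (le_trans habs (hmono j ((lo + hi) / 2) (by omega) (by omega)))
        have := ih ((lo + hi) / 2 + 1) hi (by omega) (by omega) hhp hsat hbel'
        exact this
    · rw [if_neg hlt]
      have heq : lo = hi := by omega
      subst heq
      exact ⟨le_refl _, hsat, hbel⟩

-- take-sums are monotone when all elements are nonnegative
theorem take_sum_mono (e : List Int) (he : ∀ x ∈ e, 0 ≤ x) (i j : Nat) (hij : i ≤ j) :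
    (e.take i).sum ≤ (e.take j).sum := by
  have : e.take j = e.take i ++ (e.drop i).take (j - i) := by
    rw [← List.take_add]; congr 1; omega
  rw [this, List.sum_append]
  have : 0 ≤ ((e.drop i).take (j - i)).sum := by
    apply List.sum_nonneg
    intro x hx
    exact he x (List.mem_of_mem_drop (List.mem_of_mem_take hx))
  omega

theorem main_eq (As Bs : List Int)
    (hns : (((As.zip Bs).filter (fun ab => ab.2 > ab.1)).map (fun ab => ab.2 - ab.1)).sum ≤
      (((As.zip Bs).filter (fun ab => ab.1 > ab.2)).map (fun ab => ab.1 - ab.2)).sum) :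
    (fun l nd cnt ex =>
      solveLoopA nd cnt ((PySem.List.sorted ex (fun x => x) false).reverse) =
        cnt + ((bsearchB (prefixSumsB (PySem.List.sorted ex (fun x => x) true)) nd 0
          ((prefixSumsB (PySem.List.sorted ex (fun x => x) true)).length - 1) : Nat) : Int))
      (As.zip Bs)
      (((As.zip Bs).filter (fun ab => ab.2 > ab.1)).map (fun ab => ab.2 - ab.1)).sum
      ((((As.zip Bs).filter (fun ab => ab.2 > ab.1)).length : Nat) : Int)
      (((As.zip Bs).filter (fun ab => ab.1 > ab.2)).map (fun ab => ab.1 - ab.2)) := by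
  simp only []
  rw [rev_sorted_eq]
  set l := As.zip Bs with hl
  set nd := ((l.filter (fun ab => ab.2 > ab.1)).map (fun ab => ab.2 - ab.1)).sum with hnd
  set ex := ((l.filter (fun ab => ab.1 > ab.2)).map (fun ab => ab.1 - ab.2)) with hex
  set cnt := (((l.filter (fun ab => ab.2 > ab.1)).length : Nat) : Int) with hcnt
  set E := PySem.List.sorted ex (fun x => x) true with hE
  have hEperm : E.Perm ex := PySem.List.sorted_perm ex (fun x => x) true
  have hpos : ∀ x ∈ E, 0 ≤ x := by
    intro x hx
    have : x ∈ ex := hEperm.mem_iff.mp hx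
    rw [hex] at this
    obtain ⟨ab, hab, rfl⟩ := List.mem_map.mp this
    have := List.of_mem_filter hab
    simp at this
    omega
  have hEsum : E.sum = ex.sum := hEperm.sum_eq
  have hneed_le : nd ≤ E.sum := by
    rw [hEsum, hex, hnd]
    exact hns
  obtain ⟨k, hk, hval, hcov, hleast⟩ := loopA_spec E nd cnt hneed_le
  rw [hval]
  have hplen : (prefixSumsB E).length = E.length + 1 := length_prefixSumsB E
  have hmono : ∀ i j : Nat, i ≤ j → j < (prefixSumsB E).length →
      (prefixSumsB E).getD i 0 ≤ (prefixSumsB E).getD j 0 := by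
    intro i j hij hjp
    rw [prefixSumsB_getD E i (by omega), prefixSumsB_getD E j (by omega)]
    exact take_sum_mono E hpos i j hij
  have hhi : (prefixSumsB E).length - 1 = E.length := by omega
  have hsat : nd ≤ (prefixSumsB E).getD ((prefixSumsB E).length - 1) 0 := by
    rw [hhi, prefixSumsB_getD E E.length (le_refl _), List.take_length]
    exact hneed_le
  obtain ⟨hr1, hr2, hr3⟩ := bsearch_spec (prefixSumsB E) nd hmono E.length 0
    ((prefixSumsB E).length - 1) (by omega) (by omega) (by omega) hsat (by omega)
  set r := bsearchB (prefixSumsB E) nd 0 ((prefixSumsB E).length - 1) with hr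
  have hrE : r ≤ E.length := by omega
  have hkr : k = r := by
    rcases lt_trichotomy k r with h | h | h
    · exact absurd (by rw [prefixSumsB_getD E k (by omega)]; exact hcov) (hr3 k h)
    · exact h
    · exact absurd (by rw [prefixSumsB_getD E r (by omega)] at hr2; exact hr2) (hleast r h)
  rw [hkr]

-- ===== VERDICT (by name: the statement is the Claim_ definition above) =====
theorem solve_spec : Claim_equal_solve := by
  intro N As Bs _hdom hpre
  unfold Spec_solve solve solve_alt
  unfold Pre_solve at hpre
  by_cases hlt : As.sum < Bs.sum
  · simp only [hlt, if_true]
  · simp only [hlt, if_false, foldA_eq, foldl_add_sub, zero_add, List.nil_append]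
    have hns := hpre.resolve_left hlt
    exact main_eq As Bs hns
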